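-- pv_equiv track=rewrite | github.com/6Uryel9/Coversiones | Calculadora_Numerico_Avanzado/Calculadora_NumericoAvanzado.py | hexadecimal_a_decimal
-- ===== SOURCE A (Python) =====
-- def hexadecimal_a_decimal(h):
--     hexadecimales = "0123456789ABCDEF"
--     decimal = 0
--     potencia = 0
--     for digito in reversed(h):
--         decimal += hexadecimales.index(digito) * (16 ** potencia)
--         potencia += 1
--     return decimal
-- ===== SOURCE B (Python) =====
-- def hexadecimal_a_decimal(h):
--     hexadecimales = "0123456789ABCDEF"
--     decimal = 0
--     for digito in h:
--         decimal = decimal * 16 + hexadecimales.index(digito)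
--     return decimal
-- ===== Notes on version B (the rewrite author's own statement) =====
-- stated objective: simpler
-- what changed: Horner's method: a single forward pass maintaining decimal = decimal*16 + digit, replacing the reversed traversal with an explicit power counter and 16**potencia recomputed each step.
import Mathlib
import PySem

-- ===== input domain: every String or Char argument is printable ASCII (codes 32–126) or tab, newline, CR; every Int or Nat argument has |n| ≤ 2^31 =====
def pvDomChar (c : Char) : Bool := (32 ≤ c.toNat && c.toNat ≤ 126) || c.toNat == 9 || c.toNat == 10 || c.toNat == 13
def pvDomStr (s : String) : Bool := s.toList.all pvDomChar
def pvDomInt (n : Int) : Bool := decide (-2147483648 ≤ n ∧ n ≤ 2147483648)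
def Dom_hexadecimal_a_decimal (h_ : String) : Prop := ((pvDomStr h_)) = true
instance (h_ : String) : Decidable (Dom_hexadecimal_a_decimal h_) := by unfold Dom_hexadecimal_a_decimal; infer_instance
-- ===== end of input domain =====

-- B replaces A's reversed traversal with explicit powers of 16 by a single forward Horner pass (simpler).

-- ===== PORT A =====
-- the lookup string "0123456789ABCDEF", shared by both Pythons
def pvHexList : List Char := "0123456789ABCDEF".toList

-- hexadecimales.index(digito): Python str.index raises ValueError when absent (none here; excluded by Pre_)
def pvHexIdx (c : Char) : Int := ((PySem.List.index? pvHexList c).getD 0 : Nat)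

-- for digito in reversed(h): decimal += index * 16**potencia; potencia += 1
def hexadecimal_a_decimal (h_ : String) : Int :=
  (h_.toList.reverse.foldl
    (fun (st : Int × Nat) d => (st.1 + pvHexIdx d * 16 ^ st.2, st.2 + 1))
    ((0 : Int), (0 : Nat))).1

-- ===== PORT B =====
-- for digito in h: decimal = decimal * 16 + index
def hexadecimal_a_decimal_alt (h_ : String) : Int :=
  h_.toList.foldl (fun d c => d * 16 + pvHexIdx c) 0

-- ===== PRECONDITION & SPEC =====
-- Pre_ excludes exactly the inputs on which Python's str.index raises ValueError (a character
-- that is not an uppercase hex digit); both A and B raise there.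
def Pre_hexadecimal_a_decimal (h_ : String) : Prop :=
  h_.toList.all (fun c => pvHexList.contains c) = true
instance (h_ : String) : Decidable (Pre_hexadecimal_a_decimal h_) := by
  unfold Pre_hexadecimal_a_decimal; infer_instance

def pvWitness_hexadecimal_a_decimal : String := "1A3F"

def Spec_hexadecimal_a_decimal (h_ : String) (out : Int) : Prop := out = hexadecimal_a_decimal_alt h_
instance (h_ : String) (out : Int) : Decidable (Spec_hexadecimal_a_decimal h_ out) := by unfold Spec_hexadecimal_a_decimal; infer_instance

-- ===== CLAIM (what is proved, stated in full; the proofs are below) =====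
def Claim_equal_hexadecimal_a_decimal : Prop := ∀ (h_ : String), Dom_hexadecimal_a_decimal h_ → Pre_hexadecimal_a_decimal h_ → Spec_hexadecimal_a_decimal h_ (hexadecimal_a_decimal h_)

-- ===== LEMMAS AND PROOFS =====

-- Horner's fold started at a + b splits into a shifted by the list length plus the fold started at b.
theorem pvHornerShift (l : List Char) (a b : Int) :
    l.foldl (fun d c => d * 16 + pvHexIdx c) (a + b)
      = a * 16 ^ l.length + l.foldl (fun d c => d * 16 + pvHexIdx c) b := by
  induction l generalizing a b with
  | nil => simp
  | cons x xs ih =>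
    simp only [List.foldl_cons, List.length_cons]
    have : (a + b) * 16 + pvHexIdx x = a * 16 + (b * 16 + pvHexIdx x) := by ring
    rw [this, ih]
    ring

-- A's reversed loop computes Horner's value together with the length.
theorem pvLoopEq (l : List Char) :
    l.reverse.foldl (fun (st : Int × Nat) d => (st.1 + pvHexIdx d * 16 ^ st.2, st.2 + 1))
        ((0 : Int), (0 : Nat))
      = (l.foldl (fun d c => d * 16 + pvHexIdx c) 0, l.length) := by
  induction l with
  | nil => simp
  | cons x xs ih =>
    simp only [List.reverse_cons, List.foldl_append, ih, List.foldl_cons, List.length_cons]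
    have h := pvHornerShift xs (pvHexIdx x) 0
    simp only [add_zero] at h
    simp only [List.foldl_nil, zero_mul, zero_add, h, Prod.mk.injEq]
    exact ⟨by ring, trivial⟩

-- ===== VERDICT (by name: the statement is the Claim_ definition above) =====
theorem hexadecimal_a_decimal_spec : Claim_equal_hexadecimal_a_decimal := by
  intro h_ _ _
  unfold Spec_hexadecimal_a_decimal hexadecimal_a_decimal hexadecimal_a_decimal_alt
  rw [pvLoopEq]
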